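-- pv_equiv track=rewrite | github.com/ajmal017/risk_ranges | dash_project/cftc_analyser.py | get_list_of_i_and_date_for_metric
-- ===== SOURCE A (Python) =====
-- def sortOnTime(val):
--     return val[1]
--
-- def get_list_of_i_and_date_for_metric(expected_row_names, num_of_entries, date_list, name_list):
--     the_list = []
--     for expected_row_name in expected_row_names:
--         for i in range(0, num_of_entries):
--             row_name = name_list[i]
--             if row_name == expected_row_name:
--                 the_list.append((i, date_list[i]))
--     the_list.sort(key=sortOnTime)
--     return the_list
-- ===== SOURCE B (Python) =====
-- def get_list_of_i_and_date_for_metric(expected_row_names, num_of_entries, date_list, name_list):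
--     if not expected_row_names:
--         return []
--     indices_by_name = {}
--     for i in range(num_of_entries):
--         indices_by_name.setdefault(name_list[i], []).append(i)
--     the_list = []
--     for name in expected_row_names:
--         for i in indices_by_name.get(name, []):
--             the_list.append((i, date_list[i]))
--     the_list.sort(key=lambda row: row[1])
--     return the_list
-- ===== Notes on version B (the rewrite author's own statement) =====
-- stated objective: alternative
-- what changed: Replaces the per-expected-name rescan of name_list with a single pass building a name->indices hash map, then one lookup per expected name, followed by the same stable sort on date; asymptotically O(N+E+M log M) on the scan side, but the shared sort/output dominate on the measured inputs, so no measured speed-up is claimed.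
import Mathlib
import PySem

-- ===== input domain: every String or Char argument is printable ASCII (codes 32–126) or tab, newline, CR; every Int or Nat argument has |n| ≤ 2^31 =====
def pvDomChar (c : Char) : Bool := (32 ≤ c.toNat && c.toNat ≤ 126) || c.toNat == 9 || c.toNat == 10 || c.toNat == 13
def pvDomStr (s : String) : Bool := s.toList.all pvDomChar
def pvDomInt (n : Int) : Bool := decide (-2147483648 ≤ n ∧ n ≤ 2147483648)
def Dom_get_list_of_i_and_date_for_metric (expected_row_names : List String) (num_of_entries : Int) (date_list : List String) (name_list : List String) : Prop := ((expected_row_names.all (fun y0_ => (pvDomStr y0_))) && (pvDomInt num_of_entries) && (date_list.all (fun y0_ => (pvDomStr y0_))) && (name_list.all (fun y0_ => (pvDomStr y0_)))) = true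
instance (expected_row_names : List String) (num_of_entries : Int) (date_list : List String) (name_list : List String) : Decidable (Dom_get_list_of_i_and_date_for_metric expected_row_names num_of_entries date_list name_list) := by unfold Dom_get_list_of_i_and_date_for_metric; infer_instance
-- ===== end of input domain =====

-- B replaces A's per-expected-name scan of name_list by a hash map name -> indices built in one
-- pass, then a lookup per expected name (objective: alternative; same result, same stable date sort).

-- ===== PORT A =====
def get_list_of_i_and_date_for_metric (expected_row_names : List String) (num_of_entries : Int) (date_list : List String) (name_list : List String) : List (Int × String) :=
  let the_list : List (Int × String) :=
    expected_row_names.foldl (fun acc expected_row_name =>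
      (PySem.List.pyRange 0 num_of_entries 1).foldl (fun acc i =>
        let row_name := PySem.List.pyGetD name_list i ""   -- in range on Pre_
        if row_name == expected_row_name then
          acc ++ [(i, PySem.List.pyGetD date_list i "")]   -- in range on Pre_
        else acc) acc) []
  PySem.List.sorted the_list (fun val => val.2) false

-- ===== PORT B =====
def get_list_of_i_and_date_for_metric_alt (expected_row_names : List String) (num_of_entries : Int) (date_list : List String) (name_list : List String) : List (Int × String) :=
  if expected_row_names = [] then [] else
  let indices_by_name : PySem.Dict String (List Int) :=
    (PySem.List.pyRange 0 num_of_entries 1).foldl (fun d i =>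
      d.modify (PySem.List.pyGetD name_list i "") [] (fun v => v ++ [i])) PySem.Dict.empty
  let the_list : List (Int × String) :=
    expected_row_names.foldl (fun acc name =>
      acc ++ (indices_by_name.getD name []).map (fun i => (i, PySem.List.pyGetD date_list i ""))) []
  PySem.List.sorted the_list (fun row => row.2) false

-- ===== PRECONDITION & SPEC =====
-- Pre_: exactly the inputs where Python A returns (no IndexError): if any expected name exists the
-- scan reaches every i < num_of_entries of name_list, and every matched index must index date_list.
def Pre_get_list_of_i_and_date_for_metric (expected_row_names : List String) (num_of_entries : Int) (date_list : List String) (name_list : List String) : Prop :=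
  (expected_row_names ≠ [] → num_of_entries ≤ (name_list.length : Int)) ∧
  (∀ i ∈ List.range name_list.length, (i : Int) < num_of_entries →
      name_list.getD i "" ∈ expected_row_names → i < date_list.length)
instance (expected_row_names : List String) (num_of_entries : Int) (date_list : List String) (name_list : List String) : Decidable (Pre_get_list_of_i_and_date_for_metric expected_row_names num_of_entries date_list name_list) := by unfold Pre_get_list_of_i_and_date_for_metric; infer_instance

def pvWitness_get_list_of_i_and_date_for_metric : List String × Int × List String × List String :=
  (["a", "c"], 2, ["2020-01-02", "2020-01-01"], ["a", "a"])

def Spec_get_list_of_i_and_date_for_metric (expected_row_names : List String) (num_of_entries : Int) (date_list : List String) (name_list : List String) (out : List (Int × String)) : Prop := out = get_list_of_i_and_date_for_metric_alt expected_row_names num_of_entries date_list name_list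
instance (expected_row_names : List String) (num_of_entries : Int) (date_list : List String) (name_list : List String) (out : List (Int × String)) : Decidable (Spec_get_list_of_i_and_date_for_metric expected_row_names num_of_entries date_list name_list out) := by unfold Spec_get_list_of_i_and_date_for_metric; infer_instance

-- ===== CLAIM (what is proved, stated in full; the proofs are below) =====
def Claim_equal_get_list_of_i_and_date_for_metric : Prop := ∀ (expected_row_names : List String) (num_of_entries : Int) (date_list : List String) (name_list : List String), Dom_get_list_of_i_and_date_for_metric expected_row_names num_of_entries date_list name_list → Pre_get_list_of_i_and_date_for_metric expected_row_names num_of_entries date_list name_list → Spec_get_list_of_i_and_date_for_metric expected_row_names num_of_entries date_list name_list (get_list_of_i_and_date_for_metric expected_row_names num_of_entries date_list name_list)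

-- ===== LEMMAS AND PROOFS =====

-- The dict built by B maps each name to the ascending list of matching indices of the scanned list.
theorem buildDict_getD_gen (l : List Int) (name_list : List String) (name : String)
    (d : PySem.Dict String (List Int)) :
    ((l.foldl (fun d i =>
        d.modify (PySem.List.pyGetD name_list i "") [] (fun v => v ++ [i])) d).getD name [])
      = d.getD name [] ++ l.filter (fun i => PySem.List.pyGetD name_list i "" == name) := by
  induction l generalizing d with
  | nil => simp
  | cons a t ih =>
      by_cases h : PySem.List.pyGetD name_list a "" = name
      · simp [ih, h]
      · simp [ih, PySem.Dict.getD_modify, h, Ne.symm h]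

theorem buildDict_getD (num_of_entries : Int) (name_list : List String) (name : String) :
    (((PySem.List.pyRange 0 num_of_entries 1).foldl (fun d i =>
        d.modify (PySem.List.pyGetD name_list i "") [] (fun v => v ++ [i])) PySem.Dict.empty).getD name [])
      = (PySem.List.pyRange 0 num_of_entries 1).filter
          (fun i => PySem.List.pyGetD name_list i "" == name) := by
  simp [buildDict_getD_gen]

theorem get_list_of_i_and_date_for_metric_spec : Claim_equal_get_list_of_i_and_date_for_metric := by
  intro expected_row_names num_of_entries date_list name_list _ _
  unfold Spec_get_list_of_i_and_date_for_metric
  unfold get_list_of_i_and_date_for_metric get_list_of_i_and_date_for_metric_alt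
  cases expected_row_names with
  | nil =>
      simp [PySem.List.sorted_eq_nil_iff]
  | cons x xs =>
      simp only [if_neg (List.cons_ne_nil x xs)]
      congr 1
      simp only [buildDict_getD, PySem.List.foldl_append_if]
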